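-- pv_equiv track=rewrite | github.com/Noxam98/TgTaskManager | handlers/creators.py | filter_messages_for_media_group
-- ===== SOURCE A (Python) =====
-- def filter_messages_for_media_group(messages):
--     # Словарь для хранения отфильтрованных данных
--     media_group = {
--         "photo": [],
--         "video": [],
--         "document": []
--     }
--
--     # Итерация по сообщениям и распределение по типам
--     for msg in messages:
--         content_type = msg.get("content_type")
--         if content_type in media_group:
--             media_group[content_type].append(msg)
--
--     return media_group
-- ===== SOURCE B (Python) =====
-- def filter_messages_for_media_group(messages):
--     # Three independent filtering scans, one per fixed media key.
--     return {
--         key: [msg for msg in messages if msg.get("content_type") == key]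
--         for key in ("photo", "video", "document")
--     }
-- ===== Notes on version B (the rewrite author's own statement) =====
-- stated objective: simpler
-- what changed: Replaced the single guarded accumulation loop over a pre-built mutable bucket dict with a dict comprehension that builds each of the three fixed buckets by its own filtering scan of the messages.
import Mathlib
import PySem

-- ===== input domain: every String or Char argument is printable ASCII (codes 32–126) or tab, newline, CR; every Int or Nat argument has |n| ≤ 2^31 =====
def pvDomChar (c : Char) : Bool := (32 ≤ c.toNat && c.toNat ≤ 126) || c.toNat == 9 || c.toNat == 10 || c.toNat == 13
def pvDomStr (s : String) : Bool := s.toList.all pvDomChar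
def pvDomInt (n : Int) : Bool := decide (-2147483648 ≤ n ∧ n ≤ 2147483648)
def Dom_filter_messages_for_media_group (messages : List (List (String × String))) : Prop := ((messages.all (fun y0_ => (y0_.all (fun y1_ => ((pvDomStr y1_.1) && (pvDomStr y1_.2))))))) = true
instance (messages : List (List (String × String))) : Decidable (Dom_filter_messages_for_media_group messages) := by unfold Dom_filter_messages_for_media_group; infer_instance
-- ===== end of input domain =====

-- B rebuilds each of the three fixed buckets by its own filtering scan instead of A's single guarded accumulation loop (objective: simpler).


-- ===== PORT A =====
-- msg.get("content_type"): first-match association-list lookup (exact: PySem.Dict.get? scans in order)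
def pvGetCT (msg : List (String × String)) : Option String :=
  (PySem.Dict.mk msg).get? "content_type"

def filter_messages_for_media_group (messages : List (List (String × String))) : List (String × List (List (String × String))) :=
  (messages.foldl
    (fun d msg =>
      match pvGetCT msg with
      | some ct => if d.contains ct then d.modify ct [] (fun l => l ++ [msg]) else d
      | none => d)
    (PySem.Dict.ofList [("photo", ([] : List (List (String × String)))), ("video", []), ("document", [])])).items

-- ===== PORT B =====
def filter_messages_for_media_group_alt (messages : List (List (String × String))) : List (String × List (List (String × String))) :=
  ["photo", "video", "document"].map
    (fun key => (key, messages.filter (fun msg => pvGetCT msg == some key)))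

-- ===== PRECONDITION & SPEC =====
def Spec_filter_messages_for_media_group (messages : List (List (String × String))) (out : List (String × List (List (String × String)))) : Prop := out = filter_messages_for_media_group_alt messages
instance (messages : List (List (String × String))) (out : List (String × List (List (String × String)))) : Decidable (Spec_filter_messages_for_media_group messages out) := by unfold Spec_filter_messages_for_media_group; infer_instance

-- ===== CLAIM (what is proved, stated in full; the proofs are below) =====
def Claim_equal_filter_messages_for_media_group : Prop := ∀ (messages : List (List (String × String))), Dom_filter_messages_for_media_group messages → Spec_filter_messages_for_media_group messages (filter_messages_for_media_group messages)

-- ===== LEMMAS AND PROOFS =====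

-- loop invariant: folding A's step over any three-bucket dict appends the per-key filters to each bucket
theorem foldA_invariant (messages : List (List (String × String)))
    (p v d : List (List (String × String))) :
    (messages.foldl
      (fun d msg =>
        match pvGetCT msg with
        | some ct => if d.contains ct then d.modify ct [] (fun l => l ++ [msg]) else d
        | none => d)
      (PySem.Dict.mk [("photo", p), ("video", v), ("document", d)])).items =
    [("photo", p ++ messages.filter (fun m => pvGetCT m == some "photo")),
     ("video", v ++ messages.filter (fun m => pvGetCT m == some "video")),
     ("document", d ++ messages.filter (fun m => pvGetCT m == some "document"))] := by
  induction messages generalizing p v d with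
  | nil => simp
  | cons m rest ih =>
    simp only [List.foldl_cons, List.filter_cons]
    cases hct : pvGetCT m with
    | none =>
      simp [ih]
    | some ct =>
      by_cases hp : ct = "photo"
      · subst hp
        have : (PySem.Dict.mk [("photo", p), ("video", v), ("document", d)]).modify "photo" [] (fun l => l ++ [m]) =
            PySem.Dict.mk [("photo", p ++ [m]), ("video", v), ("document", d)] := by
          simp [PySem.Dict.modify, PySem.Dict.contains, PySem.Dict.get?, PySem.Dict.insert, PySem.Dict.getD]
        simp [this, ih]
      · by_cases hv : ct = "video"
        · subst hv
          have : (PySem.Dict.mk [("photo", p), ("video", v), ("document", d)]).modify "video" [] (fun l => l ++ [m]) =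
              PySem.Dict.mk [("photo", p), ("video", v ++ [m]), ("document", d)] := by
            simp [PySem.Dict.modify, PySem.Dict.contains, PySem.Dict.get?, PySem.Dict.insert, PySem.Dict.getD]
          simp [this, ih]
        · by_cases hd : ct = "document"
          · subst hd
            have : (PySem.Dict.mk [("photo", p), ("video", v), ("document", d)]).modify "document" [] (fun l => l ++ [m]) =
                PySem.Dict.mk [("photo", p), ("video", v), ("document", d ++ [m])] := by
              simp [PySem.Dict.modify, PySem.Dict.contains, PySem.Dict.get?, PySem.Dict.insert, PySem.Dict.getD]
            simp [this, ih]
          · have hcont : (PySem.Dict.mk [("photo", p), ("video", v), ("document", d)]).contains ct = false := by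
              simp [PySem.Dict.contains]
              exact ⟨fun h => hp h.symm, fun h => hv h.symm, fun h => hd h.symm⟩
            simp [hcont, ih, hp, hv, hd]

-- ===== VERDICT (by name: the statement is the Claim_ definition above) =====
theorem filter_messages_for_media_group_spec : Claim_equal_filter_messages_for_media_group := by
  intro messages _
  show filter_messages_for_media_group messages = filter_messages_for_media_group_alt messages
  rw [filter_messages_for_media_group, filter_messages_for_media_group_alt,
    show (PySem.Dict.ofList [("photo", ([] : List (List (String × String)))), ("video", []), ("document", [])]) = PySem.Dict.mk [("photo", []), ("video", []), ("document", [])] from by decide,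
    foldA_invariant]
  simp
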